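-- pv_equiv track=rewrite | github.com/joelmontavon/fhir4ds | fhir4ds/dialects/postgresql.py | _extract_collection_path
-- ===== SOURCE A (Python) =====
-- def _extract_collection_path(base_expr: str, json_path: str) -> str:
--     """PostgreSQL-optimized collection path extraction."""
--     # Convert to PostgreSQL path format
--     pg_path = json_path.replace('$.', '')
--     if '.' in pg_path:
--         parts = pg_path.split('.')
--         pg_expr = base_expr
--         for part in parts:
--             pg_expr = f"({pg_expr} -> '{part}')"
--         return pg_expr
--     else:
--         return f"({base_expr} -> '{pg_path}')"
-- ===== SOURCE B (Python) =====
-- def _extract_collection_path(base_expr: str, json_path: str) -> str: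
--     """Build the nested PostgreSQL -> expression in one pass: count the open
--     parens up front and join the per-part suffixes, instead of re-wrapping an
--     accumulator (and without a separate no-dot branch)."""
--     pg_path = json_path.replace('$.', '')
--     parts = pg_path.split('.')
--     return '(' * len(parts) + base_expr + ''.join(f" -> '{part}')" for part in parts)
-- ===== Notes on version B (the rewrite author's own statement) =====
-- stated objective: simpler
-- what changed: Replaces the branch-plus-accumulator rewrap loop by a single unconditional pass: len(parts) open parentheses are emitted up front and the per-part suffixes are joined once.
import Mathlib
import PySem

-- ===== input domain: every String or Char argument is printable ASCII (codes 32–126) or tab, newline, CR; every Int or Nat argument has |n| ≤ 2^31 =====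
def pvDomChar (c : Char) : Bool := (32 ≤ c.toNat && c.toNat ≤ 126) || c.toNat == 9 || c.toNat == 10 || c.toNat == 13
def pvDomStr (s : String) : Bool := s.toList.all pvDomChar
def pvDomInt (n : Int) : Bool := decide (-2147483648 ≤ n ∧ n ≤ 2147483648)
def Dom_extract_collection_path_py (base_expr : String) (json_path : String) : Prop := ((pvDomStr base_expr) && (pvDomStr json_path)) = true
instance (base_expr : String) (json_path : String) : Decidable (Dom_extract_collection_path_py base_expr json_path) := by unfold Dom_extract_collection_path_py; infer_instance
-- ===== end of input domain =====

-- B builds the nested expression in one unconditional pass (parens counted up front,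
-- suffixes joined once) instead of A's branch plus accumulator-rewrapping loop.

-- ===== PORT A =====
-- Port of A: replace '$.', branch on '.' membership, fold the rewrap loop over the parts.
def extract_collection_path_py (base_expr : String) (json_path : String) : String :=
  let pg_path := PySem.Chars.replace json_path.toList "$.".toList "".toList
  if PySem.Chars.isIn ".".toList pg_path then
    let parts := PySem.Chars.splitOn pg_path ".".toList
    String.ofList (parts.foldl
      (fun acc part => "(".toList ++ acc ++ " -> '".toList ++ part ++ "')".toList)
      base_expr.toList)
  else
    String.ofList ("(".toList ++ base_expr.toList ++ " -> '".toList ++ pg_path ++ "')".toList)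

-- ===== PORT B =====
-- Port of B: unconditional split; '(' * len(parts) ++ base ++ ''.join of the suffixes.
def extract_collection_path_py_alt (base_expr : String) (json_path : String) : String :=
  let pg_path := PySem.Chars.replace json_path.toList "$.".toList "".toList
  let parts := PySem.Chars.splitOn pg_path ".".toList
  String.ofList
    (PySem.Chars.join [] (List.replicate parts.length "(".toList)
      ++ base_expr.toList
      ++ PySem.Chars.join [] (parts.map (fun part => " -> '".toList ++ part ++ "')".toList)))

-- ===== PRECONDITION & SPEC =====
def Spec_extract_collection_path_py (base_expr : String) (json_path : String) (out : String) : Prop := out = extract_collection_path_py_alt base_expr json_path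
instance (base_expr : String) (json_path : String) (out : String) : Decidable (Spec_extract_collection_path_py base_expr json_path out) := by unfold Spec_extract_collection_path_py; infer_instance

-- ===== CLAIM (what is proved, stated in full; the proofs are below) =====
def Claim_equal_extract_collection_path_py : Prop := ∀ (base_expr : String) (json_path : String), Dom_extract_collection_path_py base_expr json_path → Spec_extract_collection_path_py base_expr json_path (extract_collection_path_py base_expr json_path)

-- ===== LEMMAS AND PROOFS =====

theorem join_nil_sep (l : List (List Char)) : PySem.Chars.join [] l = l.flatten := by
  induction l with
  | nil => simp [PySem.Chars.join_nil]
  | cons p rest ih =>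
    cases rest with
    | nil => simp [PySem.Chars.join_singleton]
    | cons q r => simp [PySem.Chars.join_cons_cons] at ih ⊢; simpa using ih

theorem foldl_wrap_eq (m r : List Char) (parts : List (List Char)) :
    ∀ base : List Char,
      parts.foldl (fun acc part => '(' :: (acc ++ (m ++ (part ++ r)))) base
        = (List.replicate parts.length ['(']).flatten ++ base
            ++ (parts.map (fun part => m ++ part ++ r)).flatten := by
  induction parts with
  | nil => intro base; simp
  | cons p ps ih =>
    intro base
    simp only [List.foldl_cons, List.map_cons, List.length_cons]
    rw [ih]
    simp [List.replicate_succ', List.append_assoc]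

-- go returns a single remaining piece when the separator occurs nowhere in the rest.
theorem go_no_sep (sep : List Char) :
    ∀ (l : List Char) (fuel : Nat) (cur : List Char) (acc : List (List Char)),
      ¬ sep <:+: l →
      PySem.Chars.splitOn.go sep fuel l cur acc = ((cur.reverse ++ l) :: acc).reverse := by
  intro l
  induction l with
  | nil =>
    intro fuel cur acc _
    cases fuel <;> simp [PySem.Chars.splitOn.go]
  | cons c rest ih =>
    intro fuel cur acc hinf
    cases fuel with
    | zero => simp [PySem.Chars.splitOn.go]
    | succ n =>
      have hpre : sep.isPrefixOf (c :: rest) = false := by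
        rw [← Bool.not_eq_true, List.isPrefixOf_iff_prefix]
        exact fun h => hinf h.isInfix
      rw [PySem.Chars.splitOn.go, hpre]
      simp only [Bool.false_eq_true, if_false]
      rw [ih n (c :: cur) acc (fun h => hinf (h.trans (List.suffix_cons c rest).isInfix))]
      simp

theorem splitOn_no_sep (s sep : List Char) (h : ¬ sep <:+: s) :
    PySem.Chars.splitOn s sep = [s] := by
  rw [PySem.Chars.splitOn, go_no_sep sep s _ [] [] h]; simp

-- ===== VERDICT (by name: the statement is the Claim_ definition above) =====
theorem extract_collection_path_py_spec : Claim_equal_extract_collection_path_py := by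
  intro base_expr json_path _
  unfold Spec_extract_collection_path_py extract_collection_path_py extract_collection_path_py_alt
  set pg_path := PySem.Chars.replace json_path.toList "$.".toList "".toList with hpg
  by_cases hin : PySem.Chars.isIn ".".toList pg_path = true
  · simp only [hin, if_true, join_nil_sep]
    congr 1
    simpa using foldl_wrap_eq " -> '".toList "')".toList
      (PySem.Chars.splitOn pg_path ".".toList) base_expr.toList
  · have hsplit : PySem.Chars.splitOn pg_path ".".toList = [pg_path] :=
      splitOn_no_sep pg_path _ ((PySem.Chars.isIn_eq_false_iff _ _).mp (by simpa using hin))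
    simp only [hin, hsplit, join_nil_sep]
    simp
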